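-- pv_equiv track=rewrite | github.com/maruyamakoju/sopilot | scripts/fetch_commons_videos.py | _load_custom_queries
-- ===== SOURCE A (Python) =====
-- DEFAULT_QUERIES = [
--     "maintenance reel",
--     "aircraft maintenance",
--     "equipment inspection",
--     "cleaning TESDA",
-- ]
--
-- def _load_custom_queries(values: list[str] | None) -> list[str]:
--     if not values:
--         return list(DEFAULT_QUERIES)
--     merged: list[str] = []
--     for raw in values:
--         if not raw:
--             continue
--         parts = [part.strip() for part in raw.split(",")]
--         merged.extend([part for part in parts if part])
--     return merged or list(DEFAULT_QUERIES)
-- ===== SOURCE B (Python) =====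
-- DEFAULT_QUERIES = [
--     "maintenance reel",
--     "aircraft maintenance",
--     "equipment inspection",
--     "cleaning TESDA",
-- ]
--
-- def _load_custom_queries(values: list[str] | None) -> list[str]:
--     if not values:
--         return list(DEFAULT_QUERIES)
--     merged: list[str] = []
--     for raw in values:
--         token: list[str] = []
--         pending: list[str] = []
--         for ch in raw:
--             if ch == ',':
--                 if token:
--                     merged.append(''.join(token))
--                 token = []
--                 pending = []
--             elif ch.isspace():
--                 if token:
--                     pending.append(ch)
--             else:
--                 token.extend(pending)
--                 pending = []
--                 token.append(ch)
--         if token: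
--             merged.append(''.join(token))
--     return merged or list(DEFAULT_QUERIES)
-- ===== Notes on version B (the rewrite author's own statement) =====
-- stated objective: alternative
-- what changed: B replaces A's split(',')/strip()/filter pipeline by a single character-level state machine: one pass per string with a token accumulator and a pending-whitespace buffer, emitting a token at each comma or end of string; no split or strip calls remain.
import Mathlib
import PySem

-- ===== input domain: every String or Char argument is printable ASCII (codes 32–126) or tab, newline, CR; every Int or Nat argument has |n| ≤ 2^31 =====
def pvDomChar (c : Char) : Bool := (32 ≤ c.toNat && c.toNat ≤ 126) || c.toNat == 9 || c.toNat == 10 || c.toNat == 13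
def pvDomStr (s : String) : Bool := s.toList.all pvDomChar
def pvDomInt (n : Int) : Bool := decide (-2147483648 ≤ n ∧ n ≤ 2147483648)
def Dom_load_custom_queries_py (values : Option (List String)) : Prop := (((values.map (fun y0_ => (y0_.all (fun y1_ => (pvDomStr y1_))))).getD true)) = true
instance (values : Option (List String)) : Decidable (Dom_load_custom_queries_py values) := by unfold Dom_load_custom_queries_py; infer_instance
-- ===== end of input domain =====

-- B replaces A's split/strip/filter pipeline by a one-pass character-level state machine (objective: alternative algorithm, same cost).

-- ===== PORT A =====
def pyDEFAULT_QUERIES : List String :=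
  ["maintenance reel", "aircraft maintenance", "equipment inspection", "cleaning TESDA"]

def load_custom_queries_py (values : Option (List String)) : List String :=
  match values with
  | none => pyDEFAULT_QUERIES
  | some vs =>
    if vs.isEmpty then pyDEFAULT_QUERIES
    else
      -- for raw in values: if not raw: continue; parts = [p.strip() for p in raw.split(",")]; merged.extend([p for p in parts if p])
      let merged : List (List Char) := vs.foldl (fun merged raw =>
        if raw.toList.isEmpty then merged
        else
          let parts := (PySem.Chars.splitOn raw.toList [',']).map PySem.Chars.strip
          merged ++ parts.filter (fun p => !p.isEmpty)) []
      if merged.isEmpty then pyDEFAULT_QUERIES else merged.map String.ofList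

-- ===== PORT B =====
-- one character step of B's scanner: state = (merged, token, pending whitespace)
def pvScanStep (st : List (List Char) × List Char × List Char) (ch : Char) :
    List (List Char) × List Char × List Char :=
  let (m, token, pending) := st
  if ch = ',' then
    (if token.isEmpty then m else m ++ [token], [], [])
  else if PySem.Chars.isspace ch then
    (m, token, if token.isEmpty then pending else pending ++ [ch])
  else
    (m, token ++ pending ++ [ch], [])

def load_custom_queries_py_alt (values : Option (List String)) : List String :=
  match values with
  | none => pyDEFAULT_QUERIES
  | some vs =>
    if vs.isEmpty then pyDEFAULT_QUERIES
    else
      let merged : List (List Char) := vs.foldl (fun merged raw =>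
        let st := raw.toList.foldl pvScanStep (merged, ([] : List Char), ([] : List Char))
        if st.2.1.isEmpty then st.1 else st.1 ++ [st.2.1]) []
      if merged.isEmpty then pyDEFAULT_QUERIES else merged.map String.ofList

-- ===== PRECONDITION & SPEC =====
def Spec_load_custom_queries_py (values : Option (List String)) (out : List String) : Prop := out = load_custom_queries_py_alt values
instance (values : Option (List String)) (out : List String) : Decidable (Spec_load_custom_queries_py values out) := by unfold Spec_load_custom_queries_py; infer_instance

-- ===== CLAIM (what is proved, stated in full; the proofs are below) =====
def Claim_equal_load_custom_queries_py : Prop := ∀ (values : Option (List String)), Dom_load_custom_queries_py values → Spec_load_custom_queries_py values (load_custom_queries_py values)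

-- ===== LEMMAS AND PROOFS =====

/-- Proof-side structural model of `PySem.Chars.splitOn · [',']`. -/
def pvSplit : List Char → List (List Char)
  | [] => [[]]
  | c :: rest => if c = ',' then [] :: pvSplit rest else (pvSplit rest).modifyHead (c :: ·)

theorem pvSplit_ne_nil (l : List Char) : pvSplit l ≠ [] := by
  cases l with
  | nil => simp [pvSplit]
  | cons c rest =>
    simp only [pvSplit]
    split
    · simp
    · cases h : pvSplit rest with
      | nil => exact absurd h (pvSplit_ne_nil rest)
      | cons a as => simp

theorem modifyHead_fun_id {α : Type} (l : List α) : List.modifyHead (fun x => x) l = l := by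
  cases l <;> simp

theorem pvGo_eq (fuel : Nat) (l cur : List Char) (acc : List (List Char)) (h : l.length ≤ fuel) :
    PySem.Chars.splitOn.go [','] fuel l cur acc
      = acc.reverse ++ (pvSplit l).modifyHead (cur.reverse ++ ·) := by
  induction l generalizing fuel cur acc with
  | nil =>
    cases fuel <;> simp [PySem.Chars.splitOn.go, pvSplit]
  | cons c rest ih =>
    cases fuel with
    | zero => simp at h
    | succ f =>
      rw [PySem.Chars.splitOn.go]
      by_cases hc : c = ','
      · subst hc
        simp only [List.isPrefixOf, BEq.rfl, Bool.true_and, if_true, List.length_cons,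
          List.length_nil, Nat.zero_add, List.drop_succ_cons, List.drop_zero] at h ⊢
        rw [ih f [] (cur.reverse :: acc) (by omega)]
        simp [pvSplit, modifyHead_fun_id]
      · have hpre : List.isPrefixOf [','] (c :: rest) = false := by
          simp [List.isPrefixOf]; intro hh; exact absurd hh.symm hc
        rw [hpre]
        simp only [Bool.false_eq_true, if_false]
        rw [ih f (c :: cur) acc (by simpa using Nat.le_of_succ_le_succ (by simpa using h))]
        simp [pvSplit, hc, List.modifyHead_modifyHead, Function.comp_def]

theorem splitOn_eq_pvSplit (cs : List Char) :
    PySem.Chars.splitOn cs [','] = pvSplit cs := by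
  unfold PySem.Chars.splitOn
  rw [pvGo_eq _ _ _ _ (by omega)]
  simp [modifyHead_fun_id]

/-- Proof-side name for "split on ',', strip each part, drop the empty ones". -/
def pvClean (cs : List Char) : List (List Char) :=
  ((pvSplit cs).map PySem.Chars.strip).filter (fun p => !p.isEmpty)

theorem pvClean_nil : pvClean [] = [] := by decide

theorem foldl_clean (vs : List String) :
    vs.foldl (fun merged raw =>
        if raw.toList.isEmpty then merged
        else
          let parts := (PySem.Chars.splitOn raw.toList [',']).map PySem.Chars.strip
          merged ++ parts.filter (fun p => !p.isEmpty)) []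
      = (vs.map String.toList).flatMap pvClean := by
  have hfun : (fun (merged : List (List Char)) (raw : String) =>
        if raw.toList.isEmpty then merged
        else
          let parts := (PySem.Chars.splitOn raw.toList [',']).map PySem.Chars.strip
          merged ++ parts.filter (fun p => !p.isEmpty))
      = fun merged raw => merged ++ pvClean raw.toList := by
    funext merged raw
    by_cases h : raw.toList.isEmpty
    · rw [if_pos h]
      have : raw.toList = [] := by simpa [List.isEmpty_iff] using h
      simp [this, pvClean_nil]
    · rw [if_neg h]
      simp [pvClean, splitOn_eq_pvSplit]
  rw [hfun, PySem.List.foldl_append_eq_flatMap]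
  simp [List.flatMap_map]

-- ===== B-side: scanner = clean =====

theorem rstrip_eq_nil_iff (xs : List Char) :
    PySem.Chars.rstrip xs = [] ↔ xs.all PySem.Chars.isspace := by
  simp [PySem.Chars.rstrip, List.dropWhile_eq_nil_iff, List.all_eq_true]

theorem strip_cons_ws (c : Char) (xs : List Char) (h : PySem.Chars.isspace c) :
    PySem.Chars.strip (c :: xs) = PySem.Chars.strip xs := by
  simp [PySem.Chars.strip, PySem.Chars.lstrip, h]

theorem strip_cons_nws (c : Char) (xs : List Char) (h : ¬ PySem.Chars.isspace c) :
    PySem.Chars.strip (c :: xs) = PySem.Chars.rstrip (c :: xs) := by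
  simp [PySem.Chars.strip, PySem.Chars.lstrip, h]

theorem strip_eq_nil_iff (xs : List Char) :
    PySem.Chars.strip xs = [] ↔ xs.all PySem.Chars.isspace := by
  induction xs with
  | nil => simp [PySem.Chars.strip, PySem.Chars.lstrip, PySem.Chars.rstrip]
  | cons c rest ih =>
    by_cases h : PySem.Chars.isspace c
    · rw [strip_cons_ws c rest h]; simp [h, ih]
    · rw [strip_cons_nws c rest h, rstrip_eq_nil_iff]

theorem rstrip_cons_of_not_all (c : Char) (xs : List Char)
    (h : ¬ xs.all PySem.Chars.isspace) :
    PySem.Chars.rstrip (c :: xs) = c :: PySem.Chars.rstrip xs := by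
  have hne : List.dropWhile PySem.Chars.isspace xs.reverse ≠ [] := by
    simpa [List.dropWhile_eq_nil_iff, List.all_eq_true] using h
  simp only [PySem.Chars.rstrip, List.reverse_cons, List.dropWhile_append,
    List.isEmpty_iff]
  rw [if_neg hne]
  simp

theorem rstrip_cons_of_all (c : Char) (xs : List Char)
    (hc : ¬ PySem.Chars.isspace c) (h : xs.all PySem.Chars.isspace) :
    PySem.Chars.rstrip (c :: xs) = [c] := by
  have hnil : List.dropWhile PySem.Chars.isspace xs.reverse = [] := by
    simpa [List.dropWhile_eq_nil_iff, List.all_eq_true] using h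
  simp only [PySem.Chars.rstrip, List.reverse_cons, List.dropWhile_append, hnil,
    List.isEmpty_nil, if_pos, List.dropWhile_cons, hc]
  simp

/-- Token produced for the FIRST comma-free segment by B's scanner started at (t, p). -/
def pvFirstTok (t p seg : List Char) : List Char :=
  if seg.all PySem.Chars.isspace then t
  else if t.isEmpty then PySem.Chars.strip seg
  else t ++ p ++ PySem.Chars.rstrip seg

theorem firstTok_ws (c : Char) (t p h : List Char) (hc : PySem.Chars.isspace c) :
    pvFirstTok t p (c :: h) = pvFirstTok t (if t.isEmpty then p else p ++ [c]) h := by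
  unfold pvFirstTok
  simp only [List.all_cons, hc, Bool.true_and]
  by_cases ht : t = []
  · simp [ht, strip_cons_ws c h hc]
  · simp only [List.isEmpty_iff, ht]
    by_cases hall : h.all PySem.Chars.isspace
    · simp [hall]
    · simp [hall, rstrip_cons_of_not_all c h (by simpa using hall)]

theorem firstTok_nws (c : Char) (t p h : List Char) (hc : ¬ PySem.Chars.isspace c)
    (hp : t = [] → p = []) :
    pvFirstTok t p (c :: h) = pvFirstTok (t ++ p ++ [c]) [] h := by
  unfold pvFirstTok
  have hcall : (c :: h).all PySem.Chars.isspace = false := by simp [hc]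
  have hne : (t ++ p ++ [c]) ≠ [] := by simp
  simp only [hcall, Bool.false_eq_true, if_false, List.isEmpty_iff, hne]
  by_cases hall : h.all PySem.Chars.isspace
  · simp only [hall, if_true]
    by_cases ht : t = []
    · simp [ht, hp ht, strip_cons_nws c h hc, rstrip_cons_of_all c h hc hall]
    · simp [ht, rstrip_cons_of_all c h hc hall]
  · simp only [hall, Bool.false_eq_true, if_false]
    have hr := rstrip_cons_of_not_all c h (by simpa using hall)
    by_cases ht : t = []
    · simp [ht, hp ht, strip_cons_nws c h hc, hr]
    · simp [ht, hr]

/-- The first-token form of the scanner result coincides with `pvClean` when started empty. -/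
theorem clean_head_form (cs : List Char) :
    (if (pvFirstTok [] [] (pvSplit cs).headI).isEmpty then []
     else [pvFirstTok [] [] (pvSplit cs).headI])
      ++ ((pvSplit cs).tail.map PySem.Chars.strip).filter (fun p => !p.isEmpty)
      = pvClean cs := by
  obtain ⟨h, tl, hh⟩ : ∃ h tl, pvSplit cs = h :: tl := by
    cases hs : pvSplit cs with
    | nil => exact absurd hs (pvSplit_ne_nil cs)
    | cons a as => exact ⟨a, as, rfl⟩
  simp only [pvClean, hh, List.headI, List.tail_cons, List.map_cons, List.filter_cons]
  by_cases hall : h.all PySem.Chars.isspace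
  · have : PySem.Chars.strip h = [] := (strip_eq_nil_iff h).mpr hall
    simp [pvFirstTok, hall, this]
  · have hne2 : (PySem.Chars.strip h).isEmpty = false := by
      simp only [List.isEmpty_eq_false_iff, ne_eq]
      intro hX; exact hall ((strip_eq_nil_iff h).mp hX)
    simp [pvFirstTok, hall, hne2]

/-- Flush the scanner's final token: proof-side name for B's per-string epilogue. -/
def pvFlush (st : List (List Char) × List Char × List Char) : List (List Char) :=
  if st.2.1.isEmpty then st.1 else st.1 ++ [st.2.1]

/-- Main scanner invariant: scanning cs from state (m,t,p) (with p empty whenever t is)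
and flushing the final token yields m, the first-segment token, then the cleaned rest. -/
theorem scan_invariant (cs : List Char) :
    ∀ (m : List (List Char)) (t p : List Char), (t = [] → p = []) →
    pvFlush (cs.foldl pvScanStep (m, t, p))
      = m ++ ((if (pvFirstTok t p (pvSplit cs).headI).isEmpty then []
               else [pvFirstTok t p (pvSplit cs).headI])
                ++ ((pvSplit cs).tail.map PySem.Chars.strip).filter (fun p => !p.isEmpty)) := by
  induction cs with
  | nil =>
    intro m t p hp
    simp only [List.foldl_nil, pvSplit, List.headI, List.tail_cons, List.map_nil,
      List.filter_nil, List.append_nil, pvFirstTok, List.all_nil, if_true, pvFlush]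
    by_cases ht : t = [] <;> simp [ht]
  | cons c rest ih =>
    intro m t p hp
    simp only [List.foldl_cons]
    by_cases hc : c = ','
    · subst hc
      have hstep : pvScanStep (m, t, p) ',' = (if t.isEmpty then m else m ++ [t], [], []) := by
        simp [pvScanStep]
      rw [hstep, ih (if t.isEmpty then m else m ++ [t]) [] [] (fun _ => rfl),
        clean_head_form rest]
      have hsp : pvSplit (',' :: rest) = [] :: pvSplit rest := by simp [pvSplit]
      have htok : pvFirstTok t p [] = t := by simp [pvFirstTok]
      have hcl : List.filter (fun p => !p.isEmpty) (List.map PySem.Chars.strip (pvSplit rest))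
          = pvClean rest := rfl
      rw [hsp]
      simp only [List.headI_cons, List.tail_cons, htok, hcl]
      by_cases ht : t = [] <;> simp [ht]
    · obtain ⟨h, tl, hh⟩ : ∃ h tl, pvSplit rest = h :: tl := by
        cases hs : pvSplit rest with
        | nil => exact absurd hs (pvSplit_ne_nil rest)
        | cons a as => exact ⟨a, as, rfl⟩
      have hsplit : pvSplit (c :: rest) = (c :: h) :: tl := by
        simp [pvSplit, hc, hh]
      by_cases hw : PySem.Chars.isspace c
      · have hstep : pvScanStep (m, t, p) c
            = (m, t, if t.isEmpty then p else p ++ [c]) := by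
          simp [pvScanStep, hc, hw]
        have hp' : t = [] → (if t.isEmpty then p else p ++ [c]) = [] := by
          intro ht; simp [ht, hp ht]
        rw [hstep, ih m t _ hp', hsplit, hh]
        simp only [List.headI, List.tail_cons]
        rw [firstTok_ws c t p h hw]
      · have hstep : pvScanStep (m, t, p) c = (m, t ++ p ++ [c], []) := by
          simp [pvScanStep, hc, hw]
        rw [hstep, ih m (t ++ p ++ [c]) [] (by simp), hsplit, hh]
        simp only [List.headI, List.tail_cons]
        rw [firstTok_nws c t p h hw hp]

theorem scan_raw_eq_clean (m : List (List Char)) (cs : List Char) :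
    pvFlush (cs.foldl pvScanStep (m, ([] : List Char), ([] : List Char))) = m ++ pvClean cs := by
  rw [scan_invariant cs m [] [] (fun _ => rfl), clean_head_form cs]

theorem foldl_scan (vs : List String) :
    vs.foldl (fun merged raw =>
        let st := raw.toList.foldl pvScanStep (merged, ([] : List Char), ([] : List Char))
        if st.2.1.isEmpty then st.1 else st.1 ++ [st.2.1]) []
      = (vs.map String.toList).flatMap pvClean := by
  have hfun : (fun (merged : List (List Char)) (raw : String) =>
        let st := raw.toList.foldl pvScanStep (merged, ([] : List Char), ([] : List Char))
        if st.2.1.isEmpty then st.1 else st.1 ++ [st.2.1])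
      = fun merged raw => merged ++ pvClean raw.toList := by
    funext merged raw
    exact scan_raw_eq_clean merged raw.toList
  rw [hfun, PySem.List.foldl_append_eq_flatMap]
  simp [List.flatMap_map]

-- ===== VERDICT (by name: the statement is the Claim_ definition above) =====
theorem load_custom_queries_py_spec : Claim_equal_load_custom_queries_py := by
  intro values _
  unfold Spec_load_custom_queries_py load_custom_queries_py load_custom_queries_py_alt
  cases values with
  | none => rfl
  | some vs =>
    cases vs with
    | nil => rfl
    | cons s ss =>
      simp only [List.isEmpty_cons, Bool.false_eq_true, if_false]
      rw [foldl_clean, foldl_scan]
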